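-- pv_equiv track=rewrite | github.com/hampusrs/Advent-of-Code-2022 | day-03/part-02.py | find_mutuals
-- ===== SOURCE A (Python) =====
-- def find_mutuals(data):
--     mutuals = []
--
--     for i in range(0, len(data)-2, 3):
--         a, b, c = data[i], data[i+1], data[i+2]
--         temp = set(a).intersection(b)
--         temp = temp.intersection(c)
--         mutuals.append(temp)
--
--
--     return mutuals
-- ===== SOURCE B (Python) =====
-- def find_mutuals(data):
--     mutuals = []
--     for a, b, c in zip(data[0::3], data[1::3], data[2::3]):
--         counts = {}
--         for group in (set(a), set(b), set(c)):
--             for ch in group: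
--                 counts[ch] = counts.get(ch, 0) + 1
--         mutuals.append({ch for ch, n in counts.items() if n == 3})
--     return mutuals
-- ===== Notes on version B (the rewrite author's own statement) =====
-- stated objective: alternative
-- what changed: Replaces the indexed loop with successive pairwise set intersections by zipping three stride-3 slices into triples and, per triple, tallying every element of the three sets in a frequency dict and keeping those whose tally equals 3.
import Mathlib
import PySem

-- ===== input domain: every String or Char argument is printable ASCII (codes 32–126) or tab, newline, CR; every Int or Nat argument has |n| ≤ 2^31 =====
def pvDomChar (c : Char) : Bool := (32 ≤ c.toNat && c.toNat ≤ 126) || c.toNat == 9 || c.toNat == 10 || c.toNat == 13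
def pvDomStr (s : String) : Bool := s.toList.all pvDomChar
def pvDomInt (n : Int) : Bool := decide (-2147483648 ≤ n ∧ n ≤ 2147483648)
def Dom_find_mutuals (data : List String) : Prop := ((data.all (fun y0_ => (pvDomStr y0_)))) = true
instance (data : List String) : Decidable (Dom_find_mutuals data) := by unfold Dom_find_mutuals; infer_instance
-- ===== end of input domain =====

-- B replaces the successive pairwise set intersections of A's indexed loop by zipping three
-- stride-3 slices into triples and, per triple, tallying the elements of the three sets in a
-- frequency dict and keeping those tallied 3 times (objective: alternative, same cost).

-- iterating a Python str yields its characters as 1-character strings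
def pvS (s : String) : List String := s.toList.map (fun c => String.ofList [c])

-- ===== PORT A =====
def find_mutuals (data : List String) : List (List String) :=
  (PySem.List.pyRange 0 (PySem.List.len data - 2) 3).foldl
    (fun mutuals i =>
      let a := PySem.List.pyGetD data i ""
      let b := PySem.List.pyGetD data (i + 1) ""
      let c := PySem.List.pyGetD data (i + 2) ""
      let temp := PySem.Set.inter (PySem.Set.ofList (pvS a)) (pvS b)
      let temp2 := PySem.Set.inter temp (pvS c)
      mutuals ++ [temp2]) []

-- ===== PORT B =====
def find_mutuals_alt (data : List String) : List (List String) :=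
  let s0 := (PySem.List.slice? data (some 0) none 3).getD []
  let s1 := (PySem.List.slice? data (some 1) none 3).getD []
  let s2 := (PySem.List.slice? data (some 2) none 3).getD []
  (s0.zip (s1.zip s2)).foldl
    (fun mutuals t =>
      let counts :=
        [PySem.Set.ofList (pvS t.1), PySem.Set.ofList (pvS t.2.1), PySem.Set.ofList (pvS t.2.2)].foldl
          (fun counts g =>
            g.foldl (fun counts ch => counts.insert ch (counts.getD ch 0 + 1)) counts)
          (PySem.Dict.empty : PySem.Dict String Int)
      mutuals ++ [PySem.Set.ofList ((counts.items.filter (fun p => p.2 == 3)).map (·.1))]) []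

-- ===== PRECONDITION & SPEC =====
def Spec_find_mutuals (data : List String) (out : List (List String)) : Prop := out = find_mutuals_alt data
instance (data : List String) (out : List (List String)) : Decidable (Spec_find_mutuals data out) := by unfold Spec_find_mutuals; infer_instance

-- ===== CLAIM (what is proved, stated in full; the proofs are below) =====
def Claim_equal_find_mutuals : Prop := ∀ (data : List String), Dom_find_mutuals data → Spec_find_mutuals data (find_mutuals data)

-- ===== LEMMAS AND PROOFS =====

-- the groups of three that both programs process, in order
def pvChunk : List String → List (String × String × String)
  | a :: b :: c :: rest => (a, b, c) :: pvChunk rest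
  | _ => []

-- A's value for one group
def pvGA (a b c : String) : List String :=
  PySem.Set.inter (PySem.Set.inter (PySem.Set.ofList (pvS a)) (pvS b)) (pvS c)

-- B's value for one group
def pvGB (a b c : String) : List String :=
  let counts :=
    [PySem.Set.ofList (pvS a), PySem.Set.ofList (pvS b), PySem.Set.ofList (pvS c)].foldl
      (fun counts g =>
        g.foldl (fun counts ch => counts.insert ch (counts.getD ch 0 + 1)) counts)
      (PySem.Dict.empty : PySem.Dict String Int)
  PySem.Set.ofList ((counts.items.filter (fun p => p.2 == 3)).map (·.1))

lemma pyRange3_nil (b : Int) (h : b ≤ 0) : PySem.List.pyRange 0 b 3 = [] := by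
  rw [PySem.List.pyRange_of_pos _ _ (by norm_num)]
  simp [show ¬ (0 < b) by omega]

lemma pyRange3_cons (b : Int) (h : 0 < b) :
    PySem.List.pyRange 0 b 3 = 0 :: (PySem.List.pyRange 0 (b - 3) 3).map (· + 3) := by
  rw [PySem.List.pyRange_of_pos _ _ (by norm_num), PySem.List.pyRange_of_pos _ _ (by norm_num)]
  have hc : ((b - 0 + 3 - 1) / 3).toNat
      = (if 0 < b - 3 then ((b - 3 - 0 + 3 - 1) / 3).toNat else 0) + 1 := by
    split <;> omega
  rw [if_pos h, hc, List.range_succ_eq_map]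
  simp only [List.map_cons, List.map_map, Nat.cast_zero, mul_zero, zero_add]
  congr 1
theorem pvA_map (f : String → String → String → List String) (data : List String) :
    (PySem.List.pyRange 0 ((data.length : Int) - 2) 3).map (fun i =>
      f (PySem.List.pyGetD data i "") (PySem.List.pyGetD data (i + 1) "")
        (PySem.List.pyGetD data (i + 2) ""))
      = (pvChunk data).map (fun t => f t.1 t.2.1 t.2.2) := by
  induction data using pvChunk.induct with
  | case1 a b c rest ih =>
    have hlen : ((a :: b :: c :: rest).length : Int) - 2 = ((rest.length : Int) - 2) + 3 := by
      simp; omega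
    rw [hlen, pyRange3_cons _ (by omega),
      show (rest.length : Int) - 2 + 3 - 3 = (rest.length : Int) - 2 by ring]
    simp only [List.map_cons, List.map_map, pvChunk]
    have sh : ∀ (j : Int), 0 ≤ j →
        PySem.List.pyGetD (a :: b :: c :: rest) (j + 3) "" = PySem.List.pyGetD rest j "" := by
      intro j hj
      rw [PySem.List.pyGetD_of_nonneg _ _ (by omega), PySem.List.pyGetD_of_nonneg _ _ hj,
        show (j + 3).toNat = j.toNat + 3 by omega]
      rfl
    congr 1
    · rw [PySem.List.pyGetD_of_nonneg _ _ (by norm_num),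
        PySem.List.pyGetD_of_nonneg _ _ (by norm_num),
        PySem.List.pyGetD_of_nonneg _ _ (by norm_num)]
      rfl
    · rw [← ih]
      apply List.map_congr_left
      intro i hi
      have h0 : 0 ≤ i := by
        have := (PySem.List.mem_pyRange_iff_of_pos (by norm_num) i).mp hi
        omega
      simp only [Function.comp]
      rw [show i + 3 + 1 = (i + 1) + 3 by ring, show i + 3 + 2 = (i + 2) + 3 by ring,
        sh i h0, sh (i + 1) (by omega), sh (i + 2) (by omega)]
  | case2 data h =>
    have hnil : PySem.List.pyRange 0 ((data.length : Int) - 2) 3 = [] := by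
      apply pyRange3_nil
      match data, h with
      | [], _ => simp
      | [x], _ => simp
      | [x, y], _ => simp
      | x :: y :: z :: r, h => exact absurd rfl (h x y z r)
    have hch : pvChunk data = [] := by
      match data, h with
      | [], _ => rfl
      | [x], _ => rfl
      | [x, y], _ => rfl
      | x :: y :: z :: r, h => exact absurd rfl (h x y z r)
    rw [hnil, hch]
    rfl

lemma sl0 {α : Type} (a b c : α) (rest : List α) :
  (PySem.List.slice? (a::b::c::rest) (some 0) none 3).getD []
    = a :: (PySem.List.slice? rest (some 0) none 3).getD [] := by
  simp only [PySem.List.slice?, PySem.List.sliceIndices]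
  norm_num
  have hmin : min (0:Int) ((rest.length:Int) + 1 + 1 + 1) = 0 := by omega
  rw [hmin, if_pos (by omega : (0:Int) ≤ (rest.length:Int) + 1 + 1)]
  have hcount : (((rest.length:Int) + 1 + 1 + 1 - 0 + 3 - 1) / 3).toNat
      = (if 0 < rest.length then (((rest.length:Int) + 3 - 1) / 3).toNat else 0) + 1 := by
    split <;> omega
  rw [hcount, List.range_succ_eq_map, List.filterMap_cons, List.filterMap_map]
  norm_num
  congr 1

lemma sl1 {α : Type} (a b c : α) (rest : List α) :
  (PySem.List.slice? (a::b::c::rest) (some 1) none 3).getD []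
    = b :: (PySem.List.slice? rest (some 1) none 3).getD [] := by
  match rest with
  | [] =>
    simp only [PySem.List.slice?, PySem.List.sliceIndices]
    norm_num [List.filterMap]
  | r0 :: rest' =>
    simp only [PySem.List.slice?, PySem.List.sliceIndices]
    norm_num
    rw [show min (1:Int) ((rest'.length:Int) + 1 + 1 + 1 + 1) = 1 by omega,
        if_pos (by omega : (0:Int) ≤ (rest'.length:Int) + 1 + 1),
        show (((rest'.length:Int) + 1 + 1 + 1 + 1 - 1 + 3 - 1) / 3).toNat
          = (if 0 < rest'.length then (((rest'.length:Int) + 3 - 1) / 3).toNat else 0) + 1 by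
          split <;> omega,
        List.range_succ_eq_map, List.filterMap_cons, List.filterMap_map]
    norm_num
    congr 1

lemma sl2 {α : Type} (a b c : α) (rest : List α) :
  (PySem.List.slice? (a::b::c::rest) (some 2) none 3).getD []
    = c :: (PySem.List.slice? rest (some 2) none 3).getD [] := by
  match rest with
  | [] =>
    simp only [PySem.List.slice?, PySem.List.sliceIndices]
    norm_num [List.filterMap, show Int.toNat 2 = 2 from rfl]
  | [r0] =>
    simp only [PySem.List.slice?, PySem.List.sliceIndices]
    norm_num [List.filterMap, show Int.toNat 2 = 2 from rfl]
  | r0 :: r1 :: rest' =>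
    simp only [PySem.List.slice?, PySem.List.sliceIndices]
    norm_num
    rw [show min (2:Int) ((rest'.length:Int) + 1 + 1) = 2 by omega,
        show min (2:Int) ((rest'.length:Int) + 1 + 1 + 1 + 1 + 1) = 2 by omega,
        show (((rest'.length:Int) + 1 + 1 + 1 + 1 + 1 - 2 + 3 - 1) / 3).toNat
          = (if (2:Int) ≤ (rest'.length:Int) + 1 then (((rest'.length:Int) + 1 + 1 - 2 + 3 - 1) / 3).toNat else 0) + 1 by
          split <;> omega,
        if_pos (by omega : (2:Int) ≤ (rest'.length:Int) + 1 + 1 + 1 + 1),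
        List.range_succ_eq_map, List.filterMap_cons, List.filterMap_map]
    norm_num
    congr 1

lemma sl2_short {α : Type} (data : List α) (h : data.length ≤ 2) :
    (PySem.List.slice? data (some 2) none 3).getD [] = [] := by
  match data, h with
  | [], _ =>
    simp [PySem.List.slice?, PySem.List.sliceIndices]
  | [x], _ =>
    simp [PySem.List.slice?, PySem.List.sliceIndices]
  | [x, y], _ =>
    simp [PySem.List.slice?, PySem.List.sliceIndices]

theorem pvB_map (f : String → String → String → List String) (data : List String) :
    (((PySem.List.slice? data (some 0) none 3).getD []).zip
      (((PySem.List.slice? data (some 1) none 3).getD []).zip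
        ((PySem.List.slice? data (some 2) none 3).getD []))).map
      (fun t => f t.1 t.2.1 t.2.2)
    = (pvChunk data).map (fun t => f t.1 t.2.1 t.2.2) := by
  induction data using pvChunk.induct with
  | case1 a b c rest ih =>
    rw [sl0, sl1, sl2]
    simp only [List.zip_cons_cons, List.map_cons, pvChunk]
    rw [ih]
  | case2 data h =>
    have h2 : data.length ≤ 2 := by
      match data, h with
      | [], _ => simp
      | [x], _ => simp
      | [x, y], _ => simp
      | x :: y :: z :: r, h => exact absurd rfl (h x y z r)
    have hch : pvChunk data = [] := by
      match data, h with
      | [], _ => rfl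
      | [x], _ => rfl
      | [x, y], _ => rfl
      | x :: y :: z :: r, h => exact absurd rfl (h x y z r)
    rw [sl2_short data h2, hch, List.zip_nil_right, List.zip_nil_right]

theorem pvGB_eq_pvGA (a b c : String) : pvGB a b c = pvGA a b c := by
  unfold pvGB pvGA
  simp only [List.foldl_cons, List.foldl_nil, ← List.foldl_append]
  rw [PySem.Dict.foldl_insert_getD_add_one_eq_counter, PySem.Dict.items_counter]
  set A' := PySem.Set.ofList (pvS a) with hA
  set B' := PySem.Set.ofList (pvS b) with hB
  set C' := PySem.Set.ofList (pvS c) with hC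
  set xs := A' ++ B' ++ C' with hxs
  rw [List.filter_map, List.map_map]
  have hid : ((·.1 : String × Int → String) ∘ fun k => (k, (List.count k xs : Int))) = id := rfl
  rw [hid, List.map_id]
  have hpred : ((fun p : String × Int => p.2 == 3) ∘ fun k => (k, (List.count k xs : Int)))
      = fun k => ((List.count k xs : Int) == 3) := rfl
  rw [hpred]
  rw [PySem.Set.ofList_eq_self_of_nodup _ ((PySem.Set.nodup_ofList xs).filter _)]
  rw [hxs, List.append_assoc, PySem.Set.ofList_append, hA, PySem.Set.ofList_ofList,
    PySem.Set.update_eq_append_filter, List.filter_append]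
  have hR : List.filter (fun k => ((List.count k xs : Int) == 3))
      (List.filter (fun y => !PySem.Set.contains A' y) (PySem.Set.ofList (B' ++ C'))) = [] := by
    rw [List.filter_eq_nil_iff]
    intro k hk
    rw [List.mem_filter] at hk
    have hkA : k ∉ A' := by
      have := hk.2; simp at this; exact this
    have c1 : List.count k A' = 0 := List.count_eq_zero.mpr hkA
    have c2 : List.count k B' ≤ 1 := List.nodup_iff_count_le_one.mp (PySem.Set.nodup_ofList _) k
    have c3 : List.count k C' ≤ 1 := List.nodup_iff_count_le_one.mp (PySem.Set.nodup_ofList _) k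
    have : List.count k xs ≤ 2 := by
      rw [hxs, List.count_append, List.count_append, c1]; omega
    simp only [beq_iff_eq]
    intro h
    have : (3:Int) ≤ 2 := by rw [← h]; exact_mod_cast Nat.cast_le.mpr this
    omega
  simp only [← hA]
  rw [← List.append_assoc, ← hxs, hR, List.append_nil]
  show _ = List.filter (fun x => List.contains (pvS c) x) (List.filter (fun x => List.contains (pvS b) x) A')
  rw [List.filter_filter]
  apply List.filter_congr
  intro k hk
  have c1 : List.count k A' = 1 :=
    List.count_eq_one_of_mem (PySem.Set.nodup_ofList _) hk
  have cB : List.count k B' = (if k ∈ pvS b then 1 else 0) := by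
    split
    · exact List.count_eq_one_of_mem (PySem.Set.nodup_ofList _) (by rwa [hB, PySem.Set.mem_ofList])
    · exact List.count_eq_zero.mpr (by rw [hB, PySem.Set.mem_ofList]; assumption)
  have cC : List.count k C' = (if k ∈ pvS c then 1 else 0) := by
    split
    · exact List.count_eq_one_of_mem (PySem.Set.nodup_ofList _) (by rwa [hC, PySem.Set.mem_ofList])
    · exact List.count_eq_zero.mpr (by rw [hC, PySem.Set.mem_ofList]; assumption)
  have hcnt : List.count k xs = List.count k A' + List.count k B' + List.count k C' := by
    rw [hxs, List.count_append, List.count_append]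
  by_cases hb : k ∈ pvS b <;> by_cases hc' : k ∈ pvS c <;>
    simp only [hb, hc', if_true, if_false, c1, cB, cC] at hcnt <;>
    simp [hcnt, hb, hc']

theorem pvA_eq_chunks (data : List String) :
    find_mutuals data = (pvChunk data).map (fun t => pvGA t.1 t.2.1 t.2.2) := by
  simp only [find_mutuals, PySem.List.len_eq, PySem.List.foldl_append_singleton_eq_map,
    List.nil_append]
  exact pvA_map pvGA data

theorem pvB_eq_chunks (data : List String) :
    find_mutuals_alt data = (pvChunk data).map (fun t => pvGB t.1 t.2.1 t.2.2) := by
  simp only [find_mutuals_alt, PySem.List.foldl_append_singleton_eq_map, List.nil_append]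
  exact pvB_map pvGB data

-- ===== VERDICT (by name: the statement is the Claim_ definition above) =====
theorem find_mutuals_spec : Claim_equal_find_mutuals := by
  intro data _
  unfold Spec_find_mutuals
  rw [pvA_eq_chunks, pvB_eq_chunks]
  exact (List.map_congr_left (fun t _ => pvGB_eq_pvGA t.1 t.2.1 t.2.2)).symm
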